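-- pv_equiv track=rewrite | github.com/thomasthaddeus/MusicalChairs | src/modules/with_heapq.py | hq_seat_arrange
-- ===== SOURCE A (Python) =====
-- import heapq
--
-- def hq_seat_arrange(N, S, W):
--     """Finds the seating arrangement according to the given rules.
--
--     Uses two priority queues (heaps) to efficiently find the best row for each
--     boy and girl. Boys choose a row where both seats are free, and out of those rows,
--     they pick the smallest one. Girls choose a row where one seat is taken
--     by a boy, and out of those rows, they pick the largest one.
--
--     Parameters:
--     ----------
--     N : int
--         The number of rows.
--     S : str
--         The sequence of people entering.
--     W : list
--         The widths of each row.
--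
--     Returns:
--     ----------
--     list
--         The list of rows with their current seat status.
--     """
--     # Initialize two heaps
--     boys_heap = [[w, i] for i, w in enumerate(W)]  # Min heap for boys
--     girls_heap = []  # Max heap for girls, currently empty
--
--     # Convert boys_heap into a heap (i.e., partially ordered, root element is smallest)
--     heapq.heapify(boys_heap)
--
--     # Initialize an empty seating arrangement
--     seats = [None]*N
--     for person in S:
--         if person == '0':  # Boy
--             # Get the row with minimum width from boys_heap
--             _, row = heapq.heappop(boys_heap)
--             seats[row] = 'B'  # Mark this row as occupied by a boy
--             # Push this row into girls_heap
--             heapq.heappush(girls_heap, [-W[row], row])  # We use -W[row] because Python's heapq provides min heap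
--         else:  # Girl
--             # Get the row with maximum width from girls_heap
--             _, row = heapq.heappop(girls_heap)
--             seats[row] += 'G'  # Mark this row as also occupied by a girl
--
--     return seats
-- ===== SOURCE B (Python) =====
-- def hq_seat_arrange(N, S, W):
--     """Seating via one presort: boys take rows in ascending (width, index)
--     order from a precomputed list; girls take the widest boy-only row
--     (smallest index on ties) by a max-scan over currently available rows."""
--     order = sorted(range(len(W)), key=lambda i: (W[i], i))
--     seats = [None] * N
--     p = 0
--     avail = []  # rows holding exactly one boy, in the order boys sat down
--     for person in S:
--         if person == '0':
--             row = order[p]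
--             p += 1
--             seats[row] = 'B'
--             avail.append(row)
--         else:
--             row = max(avail, key=lambda r: (W[r], -r))
--             avail.remove(row)
--             seats[row] += 'G'
--     return seats
-- ===== Notes on version B (the rewrite author's own statement) =====
-- stated objective: alternative
-- what changed: A's boys min-heap is replaced by one presort of the row indices by (width, index) consumed with a pointer, and its girls max-heap by a plain list scanned with max(key=(width, -index)); no heaps remain.
import Mathlib
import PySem

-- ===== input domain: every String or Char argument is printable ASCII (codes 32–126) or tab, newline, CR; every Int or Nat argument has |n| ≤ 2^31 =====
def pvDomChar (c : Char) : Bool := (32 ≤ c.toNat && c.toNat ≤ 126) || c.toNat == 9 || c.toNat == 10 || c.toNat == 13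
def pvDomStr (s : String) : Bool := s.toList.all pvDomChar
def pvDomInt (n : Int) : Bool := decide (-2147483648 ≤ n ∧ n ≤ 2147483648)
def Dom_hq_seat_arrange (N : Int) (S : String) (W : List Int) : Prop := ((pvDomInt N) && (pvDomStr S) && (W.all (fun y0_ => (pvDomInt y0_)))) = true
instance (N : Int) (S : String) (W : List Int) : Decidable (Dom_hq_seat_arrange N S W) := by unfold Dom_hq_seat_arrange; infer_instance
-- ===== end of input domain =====

-- B replaces A's boys min-heap by one presort of the row indices consumed with a
-- pointer, and the girls max-heap by a plain list scanned for its maximum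
-- (objective: alternative decomposition, no heaps; same observable results).

-- ===== PORT A =====
-- Python compares the heap entries `[w, i]` (lists of two ints) lexicographically.
def pvLexLt (a b : Int × Int) : Bool := a.1 < b.1 || (a.1 == b.1 && a.2 < b.2)

-- `heapq.heappop`: return the minimum entry and the remaining entries.  The heap is
-- modelled by its multiset of entries (the internal array layout is unobservable here:
-- entries are pairwise distinct, so every pop returns the unique minimum).
-- `none` is exactly Python's IndexError on an empty heap.
def pvPopMin : List (Int × Int) → Option ((Int × Int) × List (Int × Int))
  | [] => none
  | x :: xs =>
      let m := xs.foldl (fun m y => if pvLexLt y m then y else m) x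
      some (m, (x :: xs).erase m)

-- One iteration of A's `for person in S` loop; state = (boys_heap, girls_heap, seats).
def pvStepA (W : List Int) (st : List (Int × Int) × List (Int × Int) × List (Option String))
    (c : Char) : List (Int × Int) × List (Int × Int) × List (Option String) :=
  if c = '0' then
    match pvPopMin st.1 with
    | none => st            -- Python raises IndexError here; excluded by Pre_
    | some ((_, row), boys') =>
        -- seats[row] = 'B' (row ≥ len(seats) would be an IndexError: excluded by Pre_);
        -- heappush(girls_heap, [-W[row], row]) adds to the multiset; W[row] is always in range.
        (boys', st.2.1 ++ [(-(PySem.List.pyGetD W row 0), row)],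
         st.2.2.set row.toNat (some "B"))
  else
    match pvPopMin st.2.1 with
    | none => st            -- Python raises IndexError here; excluded by Pre_
    | some ((_, row), girls') =>
        -- seats[row] += 'G'; a row in the girls heap always carries 'B' (a None seat
        -- would be Python's TypeError, unreachable), so only that case changes seats.
        (st.1, girls',
         match st.2.2[row.toNat]? with
         | some (some s) => st.2.2.set row.toNat (some (s ++ "G"))
         | _ => st.2.2)

def hq_seat_arrange (N : Int) (S : String) (W : List Int) : List (Option String) :=
  -- boys_heap = [[w, i] for i, w in enumerate(W)]; heapq.heapify only reorders the array
  let boys := (PySem.List.enumerate W).map (fun p => (p.2, p.1))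
  let seats := List.replicate N.toNat (none : Option String)   -- [None]*N
  (S.toList.foldl (pvStepA W) (boys, ([], seats))).2.2

-- ===== PORT B =====
-- `key(r) > key(m)` for key = (W[r], -r), compared lexicographically: Python's `max`
-- replaces the current element exactly when the new key is strictly greater.
def pvKeyGt (W : List Int) (r m : Int) : Bool :=
  PySem.List.pyGetD W m 0 < PySem.List.pyGetD W r 0 ||
    (PySem.List.pyGetD W r 0 == PySem.List.pyGetD W m 0 && -m < -r)

-- One iteration of B's loop; state = (p, avail, seats).
def pvStepB (W : List Int) (order : List Int) (st : Nat × List Int × List (Option String))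
    (c : Char) : Nat × List Int × List (Option String) :=
  if c = '0' then
    match order[st.1]? with
    | none => st            -- Python raises IndexError here; excluded by Pre_
    | some row => (st.1 + 1, st.2.1 ++ [row], st.2.2.set row.toNat (some "B"))
  else
    match st.2.1 with
    | [] => st              -- Python's max() raises ValueError here; excluded by Pre_
    | a :: rest =>
        let row := rest.foldl (fun m r => if pvKeyGt W r m then r else m) a
        match PySem.List.remove? st.2.1 row with
        | none => st        -- unreachable: row is an element of avail
        | some avail' =>
            (st.1, avail',
             match st.2.2[row.toNat]? with
             | some (some s) => st.2.2.set row.toNat (some (s ++ "G"))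
             | _ => st.2.2)

def hq_seat_arrange_alt (N : Int) (S : String) (W : List Int) : List (Option String) :=
  -- order = sorted(range(len(W)), key=lambda i: (W[i], i))
  let order := PySem.List.sorted2 (PySem.List.pyRange 0 (PySem.List.len W))
      (fun i => PySem.List.pyGetD W i 0) (fun i => i)
  let seats := List.replicate N.toNat (none : Option String)   -- [None]*N
  (S.toList.foldl (pvStepB W order) (0, ([], seats))).2.2

-- ===== PRECONDITION & SPEC =====
-- Pre_ = exactly the inputs where Python A returns: enough rows for the boys, every
-- girl preceded by a strictly larger number of boys, and every row a boy takes
-- (the rows of the `count('0')` smallest (width, index) pairs) lies below N.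
def Pre_hq_seat_arrange (N : Int) (S : String) (W : List Int) : Prop :=
  S.toList.count '0' ≤ W.length ∧
  (∀ n < S.toList.length,
    (S.toList.take (n+1)).countP (fun c => c ≠ '0') ≤ (S.toList.take (n+1)).count '0') ∧
  (∀ i < W.length,
    ((List.range W.length).countP
        (fun j => decide (W.getD j 0 < W.getD i 0 ∨ (W.getD j 0 = W.getD i 0 ∧ j < i))))
      < S.toList.count '0' → (i : Int) < N)
instance (N : Int) (S : String) (W : List Int) : Decidable (Pre_hq_seat_arrange N S W) := by
  unfold Pre_hq_seat_arrange; infer_instance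

def pvWitness_hq_seat_arrange : Int × String × List Int := (2, "0101", [1, 2])

def Spec_hq_seat_arrange (N : Int) (S : String) (W : List Int) (out : List (Option String)) : Prop := out = hq_seat_arrange_alt N S W
instance (N : Int) (S : String) (W : List Int) (out : List (Option String)) : Decidable (Spec_hq_seat_arrange N S W out) := by unfold Spec_hq_seat_arrange; infer_instance

-- ===== CLAIM (what is proved, stated in full; the proofs are below) =====
def Claim_equal_hq_seat_arrange : Prop := ∀ (N : Int) (S : String) (W : List Int), Dom_hq_seat_arrange N S W → Pre_hq_seat_arrange N S W → Spec_hq_seat_arrange N S W (hq_seat_arrange N S W)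

-- ===== LEMMAS AND PROOFS =====

-- the boys-side key (W[i], i) and the girls-side key (-W[r], r) of a row index
def pvF (W : List Int) (i : Int) : Int × Int := (PySem.List.pyGetD W i 0, i)
def pvG (W : List Int) (r : Int) : Int × Int := (-(PySem.List.pyGetD W r 0), r)

def pvOrder (W : List Int) : List Int :=
  PySem.List.sorted2 (PySem.List.pyRange 0 (PySem.List.len W))
    (fun i => PySem.List.pyGetD W i 0) (fun i => i)

-- invariant tying A's state to B's state
def pvInv (W : List Int) (order : List Int)
    (stA : List (Int × Int) × List (Int × Int) × List (Option String))
    (stB : Nat × List Int × List (Option String)) : Prop :=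
  stA.1.Perm ((order.drop stB.1).map (pvF W)) ∧
  stA.2.1 = stB.2.1.map (pvG W) ∧ stA.2.2 = stB.2.2

lemma pvLexLt_asymm {a b : Int × Int} (h : pvLexLt a b = true) : pvLexLt b a = false := by
  rcases a with ⟨a1, a2⟩; rcases b with ⟨b1, b2⟩
  simp only [pvLexLt, Bool.or_eq_true, Bool.and_eq_true, decide_eq_true_eq, beq_iff_eq,
    Bool.or_eq_false_iff, Bool.and_eq_false_iff, decide_eq_false_iff_not, beq_eq_false_iff_ne] at *
  omega

lemma pvLexLt_trans {a b c : Int × Int} (h1 : pvLexLt a b = true) (h2 : pvLexLt b c = true) :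
    pvLexLt a c = true := by
  rcases a with ⟨a1, a2⟩; rcases b with ⟨b1, b2⟩; rcases c with ⟨c1, c2⟩
  simp only [pvLexLt, Bool.or_eq_true, Bool.and_eq_true, decide_eq_true_eq, beq_iff_eq] at *
  omega

lemma pvLexLt_le_trans {a b c : Int × Int} (h1 : pvLexLt b a = false) (h2 : pvLexLt b c = true) :
    pvLexLt a c = true := by
  rcases a with ⟨a1, a2⟩; rcases b with ⟨b1, b2⟩; rcases c with ⟨c1, c2⟩
  simp only [pvLexLt, Bool.or_eq_true, Bool.and_eq_true, decide_eq_true_eq, beq_iff_eq,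
    Bool.or_eq_false_iff, Bool.and_eq_false_iff, decide_eq_false_iff_not, beq_eq_false_iff_ne] at *
  omega

lemma pvLexLt_antisymm {a b : Int × Int} (h1 : pvLexLt a b = false) (h2 : pvLexLt b a = false) :
    a = b := by
  rcases a with ⟨a1, a2⟩; rcases b with ⟨b1, b2⟩
  simp only [pvLexLt, Bool.or_eq_false_iff, Bool.and_eq_false_iff, decide_eq_false_iff_not,
    beq_eq_false_iff_ne, Prod.mk.injEq] at *
  omega

lemma pvG_injective (W : List Int) : Function.Injective (pvG W) := by
  intro a b h
  have := congrArg Prod.snd h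
  simpa [pvG] using this

-- the running-choice loop returns an element of the list
lemma pvFoldChoice_mem {α : Type} (q : α → α → Bool) (x : α) (xs : List α) :
    xs.foldl (fun m y => if q y m then y else m) x ∈ x :: xs := by
  induction xs generalizing x with
  | nil => simp
  | cons y ys ih =>
      simp only [List.foldl_cons]
      by_cases hq : q y x = true
      · rw [if_pos hq]
        rcases List.mem_cons.mp (ih y) with h | h <;> simp [h]
      · rw [if_neg hq]
        rcases List.mem_cons.mp (ih x) with h | h <;> simp [h]

-- the min-scan of A is minimal for pvLexLt
lemma pvScan_min (x : Int × Int) (xs : List (Int × Int)) :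
    ∀ y ∈ x :: xs, pvLexLt y (xs.foldl (fun m y => if pvLexLt y m then y else m) x) = false := by
  induction xs generalizing x with
  | nil =>
      intro y hy
      rw [List.mem_singleton] at hy; subst hy
      rcases y with ⟨y1, y2⟩
      simp only [List.foldl_nil, pvLexLt, Bool.or_eq_false_iff, Bool.and_eq_false_iff,
        decide_eq_false_iff_not, beq_eq_false_iff_ne]
      omega
  | cons z zs ih =>
      intro y hy
      simp only [List.foldl_cons]
      by_cases hzx : pvLexLt z x = true
      · rw [if_pos hzx]
        rcases List.mem_cons.mp hy with h | h
        · subst h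
          by_contra hxr
          rw [Bool.not_eq_false] at hxr
          have hz := ih z z (by simp)
          exact absurd (pvLexLt_trans hzx hxr) (by simp [hz])
        · exact ih z y h
      · rw [if_neg hzx]
        have hzx' : pvLexLt z x = false := by simpa using hzx
        rcases List.mem_cons.mp hy with h | h
        · subst h; exact ih y y (by simp)
        · rcases List.mem_cons.mp h with h2 | h2
          · subst h2
            by_contra hzr
            rw [Bool.not_eq_false] at hzr
            have hx := ih x x (by simp)
            exact absurd (pvLexLt_le_trans hzx' hzr) (by simp [hx])
          · exact ih x y (by simp [h2])

-- identify the pop when the list is a permutation of a strictly sorted one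
lemma pvPopMin_eq {l t : List (Int × Int)} {m : Int × Int}
    (hp : l.Perm (m :: t)) (hm : ∀ z ∈ t, pvLexLt m z = true) :
    pvPopMin l = some (m, l.erase m) ∧ (l.erase m).Perm t := by
  obtain ⟨a, as, rfl⟩ : ∃ a as, l = a :: as := by
    cases l with
    | nil => simpa using hp.length_eq
    | cons a as => exact ⟨a, as, rfl⟩
  have hmem : as.foldl (fun m y => if pvLexLt y m then y else m) a ∈ a :: as :=
    pvFoldChoice_mem _ a as
  have hmin := pvScan_min a as
  have hrm : as.foldl (fun m y => if pvLexLt y m then y else m) a = m := by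
    rcases List.mem_cons.mp (hp.mem_iff.mp hmem) with h | h
    · exact h
    · have h1 := hm _ h
      have h2 := hmin m (hp.mem_iff.mpr (by simp))
      simp [h2] at h1
  refine ⟨?_, ?_⟩
  · have : pvPopMin (a :: as) =
        some (as.foldl (fun m y => if pvLexLt y m then y else m) a,
          (a :: as).erase (as.foldl (fun m y => if pvLexLt y m then y else m) a)) := rfl
    rw [this, hrm]
  · have := hp.erase m
    simpa using this

-- order facts -------------------------------------------------------------
lemma pvOrder_perm (W : List Int) :
    (pvOrder W).Perm (PySem.List.pyRange 0 (PySem.List.len W)) := by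
  exact PySem.List.sorted2_perm _ _ _ _

lemma pvF_injective (W : List Int) : Function.Injective (pvF W) := by
  intro a b h
  have := congrArg Prod.snd h
  simpa [pvF] using this

lemma pvBefore_eq (W : List Int) :
    (fun a b : Int => decide (PySem.List.pyGetD W a 0 < PySem.List.pyGetD W b 0) ||
      (!decide (PySem.List.pyGetD W b 0 < PySem.List.pyGetD W a 0) && decide (a < b)))
    = fun a b : Int => pvLexLt (pvF W a) (pvF W b) := by
  funext a b
  rw [Bool.eq_iff_iff]
  simp only [pvLexLt, pvF, Bool.or_eq_true, Bool.and_eq_true, Bool.not_eq_true',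
    decide_eq_true_eq, decide_eq_false_iff_not, beq_iff_eq]
  omega

lemma pvOrder_eq (W : List Int) :
    pvOrder W = (PySem.List.pyRange 0 (PySem.List.len W)).foldl
      (fun acc x => PySem.List.insertBy (fun a b => pvLexLt (pvF W a) (pvF W b)) x acc) [] := by
  unfold pvOrder PySem.List.sorted2
  simp only [Bool.false_eq_true, if_false, pvBefore_eq W]

lemma pvInsertBy_pairwise (W : List Int) (x : Int) (ys : List Int)
    (h : ys.Pairwise (fun a b => pvLexLt (pvF W b) (pvF W a) = false)) :
    (PySem.List.insertBy (fun a b => pvLexLt (pvF W a) (pvF W b)) x ys).Pairwise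
      (fun a b => pvLexLt (pvF W b) (pvF W a) = false) := by
  induction ys with
  | nil => simp [PySem.List.insertBy.eq_1]
  | cons y ys ih =>
      rw [PySem.List.insertBy.eq_2]
      rcases List.pairwise_cons.mp h with ⟨hy, hys⟩
      by_cases hxy : pvLexLt (pvF W x) (pvF W y) = true
      · rw [if_pos hxy]
        refine List.pairwise_cons.mpr ⟨?_, h⟩
        intro b hb
        rcases List.mem_cons.mp hb with rfl | hb
        · exact pvLexLt_asymm hxy
        · by_contra hbx
          rw [Bool.not_eq_false] at hbx
          have := pvLexLt_trans hbx hxy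
          simp [hy b hb] at this
      · rw [if_neg hxy]
        have hxy' : pvLexLt (pvF W x) (pvF W y) = false := by simpa using hxy
        refine List.pairwise_cons.mpr ⟨?_, ih hys⟩
        intro b hb
        rcases (PySem.List.mem_insertBy _ x b ys).mp hb with rfl | hb
        · exact hxy'
        · exact hy b hb

lemma pvFoldInsert_pairwise (W : List Int) (xs acc : List Int)
    (h : acc.Pairwise (fun a b => pvLexLt (pvF W b) (pvF W a) = false)) :
    (xs.foldl (fun acc x =>
        PySem.List.insertBy (fun a b => pvLexLt (pvF W a) (pvF W b)) x acc) acc).Pairwise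
      (fun a b => pvLexLt (pvF W b) (pvF W a) = false) := by
  induction xs generalizing acc with
  | nil => exact h
  | cons x xs ih => exact ih _ (pvInsertBy_pairwise W x acc h)

lemma pvOrder_nodup (W : List Int) : (pvOrder W).Nodup := by
  refine (pvOrder_perm W).nodup_iff.mpr ?_
  have h2 : PySem.List.len W = ((W.length : Nat) : Int) := by simp [pysem]
  rw [h2, PySem.List.pyRange_zero_natCast]
  refine List.Nodup.map ?_ List.nodup_range
  intro a b hab
  simpa using hab

lemma pvOrder_pairwise (W : List Int) :
    (pvOrder W).Pairwise (fun a b => pvLexLt (pvF W a) (pvF W b) = true) := by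
  have h1 : (pvOrder W).Pairwise (fun a b => pvLexLt (pvF W b) (pvF W a) = false) := by
    rw [pvOrder_eq]
    exact pvFoldInsert_pairwise W _ [] (by simp)
  have h2 : (pvOrder W).Pairwise (fun a b : Int => a ≠ b) := pvOrder_nodup W
  refine (h1.and h2).imp ?_
  rintro a b ⟨hle, hne⟩
  by_contra hab
  rw [Bool.not_eq_true] at hab
  exact hne (pvF_injective W (pvLexLt_antisymm hab hle))

lemma pvOrder_map_pairwise (W : List Int) :
    ((pvOrder W).map (pvF W)).Pairwise (fun a b => pvLexLt a b = true) := by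
  rw [List.pairwise_map]; exact pvOrder_pairwise W

-- girls scan: B's max-scan corresponds through pvG to A's min-scan
lemma pvKeyGt_eq (W : List Int) (r m : Int) :
    pvKeyGt W r m = pvLexLt (pvG W r) (pvG W m) := by
  simp only [pvKeyGt, pvLexLt, pvG]
  rw [Bool.eq_iff_iff]
  simp only [Bool.or_eq_true, Bool.and_eq_true, decide_eq_true_eq, beq_iff_eq]
  omega

lemma pvScanB_eq (W : List Int) (a : Int) (rest : List Int) :
    pvG W (rest.foldl (fun m r => if pvKeyGt W r m then r else m) a)
      = (rest.map (pvG W)).foldl (fun m y => if pvLexLt y m then y else m) (pvG W a) := by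
  induction rest generalizing a with
  | nil => rfl
  | cons z zs ih =>
      simp only [List.foldl_cons, List.map_cons]
      rw [ih (if pvKeyGt W z a then z else a)]
      congr 1
      rw [pvKeyGt_eq]
      split <;> rfl

-- the step preserves the invariant
lemma pvStep_inv (W : List Int) (order : List Int)
    (hPW : (order.map (pvF W)).Pairwise (fun a b => pvLexLt a b = true))
    (stA : List (Int × Int) × List (Int × Int) × List (Option String))
    (stB : Nat × List Int × List (Option String)) (c : Char)
    (h : pvInv W order stA stB) :
    pvInv W order (pvStepA W stA c) (pvStepB W order stB c) := by
  obtain ⟨boysA, girlsA, seatsA⟩ := stA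
  obtain ⟨p, avail, seatsB⟩ := stB
  obtain ⟨hB, hG, hS⟩ := h
  simp only at hB hG hS
  subst hG hS
  by_cases hc : c = '0'
  · -- boy
    simp only [pvStepA, pvStepB, if_pos hc]
    by_cases hp : p < order.length
    · have hdrop : order.drop p = order[p] :: order.drop (p + 1) := List.drop_eq_getElem_cons hp
      have hget : order[p]? = some order[p] := List.getElem?_eq_getElem hp
      have hperm : boysA.Perm (pvF W order[p] :: (order.drop (p + 1)).map (pvF W)) := by
        rw [hdrop, List.map_cons] at hB; exact hB
      have hpw : ∀ z ∈ (order.drop (p + 1)).map (pvF W), pvLexLt (pvF W order[p]) z = true := by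
        have h1 : ((order.map (pvF W)).drop p).Pairwise (fun a b => pvLexLt a b = true) :=
          hPW.sublist (List.drop_sublist p _)
        rw [← List.map_drop, hdrop, List.map_cons] at h1
        exact (List.pairwise_cons.mp h1).1
      obtain ⟨hpop, hperm'⟩ := pvPopMin_eq hperm hpw
      simp only [hpop, hget, pvF]
      refine ⟨by simpa using hperm', by simp [pvG], rfl⟩
    · have hget : order[p]? = none := List.getElem?_eq_none (by omega)
      have hdnil : List.drop p order = [] := List.drop_eq_nil_of_le (by omega)
      have hnil : boysA = [] := by
        rw [hdnil, List.map_nil] at hB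
        simpa using hB
      subst hnil
      simp only [hget, pvPopMin]
      exact ⟨by simp [hdnil], rfl, rfl⟩
  · -- girl
    simp only [pvStepA, pvStepB, if_neg hc]
    cases avail with
    | nil => exact ⟨hB, rfl, rfl⟩
    | cons a rest =>
        have hrmem : (rest.foldl (fun m r => if pvKeyGt W r m then r else m) a) ∈ a :: rest := pvFoldChoice_mem (fun r m => pvKeyGt W r m) a rest
        have hpop : pvPopMin (List.map (pvG W) (a :: rest)) =
            some (pvG W (rest.foldl (fun m r => if pvKeyGt W r m then r else m) a), (List.map (pvG W) (a :: rest)).erase (pvG W (rest.foldl (fun m r => if pvKeyGt W r m then r else m) a))) := by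
          have h0 : pvPopMin (pvG W a :: rest.map (pvG W)) =
              some ((rest.map (pvG W)).foldl (fun m y => if pvLexLt y m then y else m) (pvG W a),
                (pvG W a :: rest.map (pvG W)).erase
                  ((rest.map (pvG W)).foldl (fun m y => if pvLexLt y m then y else m) (pvG W a))) := rfl
          rw [show List.map (pvG W) (a :: rest) = pvG W a :: rest.map (pvG W) from rfl, h0,
            ← pvScanB_eq W a rest]
        have herase : (List.map (pvG W) (a :: rest)).erase (pvG W (rest.foldl (fun m r => if pvKeyGt W r m then r else m) a)) =
            List.map (pvG W) ((a :: rest).erase (rest.foldl (fun m r => if pvKeyGt W r m then r else m) a)) :=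
          (List.map_erase (pvG_injective W) _).symm
        have hrem : PySem.List.remove? (a :: rest) (rest.foldl (fun m r => if pvKeyGt W r m then r else m) a) = some ((a :: rest).erase (rest.foldl (fun m r => if pvKeyGt W r m then r else m) a)) :=
          PySem.List.remove?_eq_some_erase _ _ hrmem
        simp only [hpop, hrem]
        rw [herase]
        simp only [pvG]
        exact ⟨hB, rfl, rfl⟩

lemma pvFold_inv (W : List Int) (order : List Int)
    (hPW : (order.map (pvF W)).Pairwise (fun a b => pvLexLt a b = true))
    (cs : List Char) (stA : List (Int × Int) × List (Int × Int) × List (Option String))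
    (stB : Nat × List Int × List (Option String)) (h : pvInv W order stA stB) :
    pvInv W order (cs.foldl (pvStepA W) stA) (cs.foldl (pvStepB W order) stB) := by
  induction cs generalizing stA stB with
  | nil => exact h
  | cons c cs ih => exact ih _ _ (pvStep_inv W order hPW stA stB c h)

lemma pvInit_inv (N : Int) (W : List Int) :
    pvInv W (pvOrder W)
      ((PySem.List.enumerate W).map (fun p => (p.2, p.1)), ([], List.replicate N.toNat none))
      (0, ([], List.replicate N.toNat none)) := by
  refine ⟨?_, rfl, rfl⟩
  simp only [List.drop_zero]
  have h1 : (PySem.List.enumerate W).map (fun p : Int × Int => (p.2, p.1))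
      = (PySem.List.pyRange 0 (PySem.List.len W)).map (pvF W) := by
    rw [PySem.List.enumerate_eq_map_pyRange W 0, List.map_map]; rfl
  rw [h1]
  exact ((pvOrder_perm W).map (pvF W)).symm

-- ===== VERDICT (by name: the statement is the Claim_ definition above) =====
theorem hq_seat_arrange_spec : Claim_equal_hq_seat_arrange := by
  intro N S W _ _
  unfold Spec_hq_seat_arrange hq_seat_arrange hq_seat_arrange_alt
  have h := pvFold_inv W (pvOrder W) (pvOrder_map_pairwise W) S.toList
    ((PySem.List.enumerate W).map (fun p => (p.2, p.1)), ([], List.replicate N.toNat none))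
    (0, ([], List.replicate N.toNat none)) (pvInit_inv N W)
  exact h.2.2
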